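-- pv_equiv track=rewrite | github.com/PeterBul/HW-1-NLP | code/preprocess.py | string_to_BIES
-- ===== SOURCE A (Python) =====
-- def string_to_BIES(s) -> str:
--     # Booleans to denote if previous character was a whitespace or not.
--     # Prev_whitespace initialized to True because of logic.
--
--     word_array = s.split()
--     bies_array = []
--     for word in word_array:
--         word_length = len(word)
--         if word_length == 1:
--             bies_array.append('S')
--         elif word_length == 2:
--             bies_array.append('BE')
--         else:
--             bies = ['B']
--             for i in range(1, len(word) - 1):
--                 bies.append('I')
--             bies.append('E')
--             bies_array.append("".join(bies))
--
--
--     return "".join(bies_array)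
-- ===== SOURCE B (Python) =====
-- def string_to_BIES(s) -> str:
--     # One character-level pass: each non-space char is tagged from its two
--     # neighbours in the space-padded string.
--     padded = ' ' + s + ' '
--     tags = []
--     for prev, cur, nxt in zip(padded, padded[1:], padded[2:]):
--         if cur.isspace():
--             continue
--         start = prev.isspace()
--         end = nxt.isspace()
--         tags.append('S' if start and end else 'B' if start else 'E' if end else 'I')
--     return ''.join(tags)
-- ===== Notes on version B (the rewrite author's own statement) =====
-- stated objective: alternative
-- what changed: Replaced split-into-words plus a per-word length-branched loop by a single character-level pass over the space-padded string that tags each non-space character from its two neighbours.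
import Mathlib
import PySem

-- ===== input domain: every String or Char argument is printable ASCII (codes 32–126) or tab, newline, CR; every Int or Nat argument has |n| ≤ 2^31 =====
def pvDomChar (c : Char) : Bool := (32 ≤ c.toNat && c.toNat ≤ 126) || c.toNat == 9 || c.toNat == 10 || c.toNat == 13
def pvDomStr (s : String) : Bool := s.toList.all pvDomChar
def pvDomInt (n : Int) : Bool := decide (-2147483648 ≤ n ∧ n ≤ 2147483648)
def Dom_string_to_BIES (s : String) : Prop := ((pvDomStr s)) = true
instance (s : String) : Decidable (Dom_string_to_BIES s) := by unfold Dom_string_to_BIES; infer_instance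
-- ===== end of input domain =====

-- B replaces A's split-into-words + per-word length-branched loop by a single
-- character-level pass that tags each non-space character from its two neighbours
-- in the space-padded string (objective: alternative decomposition, same cost).

-- ===== PORT A =====
def string_to_BIES (s : String) : String :=
  let word_array := PySem.Str.split₀ s
  let bies_array := word_array.foldl (fun bies_array word =>
    let word_length := PySem.Str.len word
    if word_length = 1 then bies_array ++ ["S"]
    else if word_length = 2 then bies_array ++ ["BE"]
    else
      let bies : List String := ["B"]
      let bies := (PySem.List.pyRange 1 (PySem.Str.len word - 1) 1).foldl
        (fun bies _ => bies ++ ["I"]) bies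
      let bies := bies ++ ["E"]
      bies_array ++ [PySem.Str.join "" bies]) []
  PySem.Str.join "" bies_array

-- ===== PORT B =====
def string_to_BIES_alt (s : String) : String :=
  let padded : List Char := ' ' :: s.toList ++ [' ']
  let tags := (padded.zip ((padded.drop 1).zip (padded.drop 2))).filterMap
    (fun t =>
      if PySem.Chars.isspace t.2.1 then none
      else
        let start := PySem.Chars.isspace t.1
        let stop := PySem.Chars.isspace t.2.2
        some (if start && stop then 'S' else if start then 'B'
              else if stop then 'E' else 'I'))
  String.ofList tags

-- ===== PRECONDITION & SPEC =====
def Spec_string_to_BIES (s : String) (out : String) : Prop := out = string_to_BIES_alt s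
instance (s : String) (out : String) : Decidable (Spec_string_to_BIES s out) := by unfold Spec_string_to_BIES; infer_instance

-- ===== CLAIM (what is proved, stated in full; the proofs are below) =====
def Claim_equal_string_to_BIES : Prop := ∀ (s : String), Dom_string_to_BIES s → Spec_string_to_BIES s (string_to_BIES s)

-- ===== LEMMAS AND PROOFS =====

-- the tag characters A produces for one word, as a function of the word
def pvTagW (w : List Char) : List Char :=
  if w.length = 1 then ['S']
  else if w.length = 2 then ['B', 'E']
  else 'B' :: List.replicate (w.length - 2) 'I' ++ ['E']

-- reference form of Python's whitespace split (split₀) with an explicit current word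
def pvAux : List Char → List Char → List (List Char)
  | cur, [] => if cur.isEmpty then [] else [cur]
  | cur, c :: rest =>
    if PySem.Chars.isspace c then
      if cur.isEmpty then pvAux [] rest else cur :: pvAux [] rest
    else pvAux (cur ++ [c]) rest

-- reference form of B's zip pass: scan with previous character, one-lookahead
def pvScan : Char → List Char → List Char
  | _, [] => []
  | prev, c :: rest =>
    (if PySem.Chars.isspace c then []
     else [if PySem.Chars.isspace prev && PySem.Chars.isspace (rest.headD ' ') then 'S'
           else if PySem.Chars.isspace prev then 'B'
           else if PySem.Chars.isspace (rest.headD ' ') then 'E' else 'I']) ++ pvScan c rest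

lemma pv_go_eq (s cur : List Char) (acc : List (List Char)) :
    PySem.Chars.split₀.go s cur acc = acc.reverse ++ pvAux cur.reverse s := by
  induction s generalizing cur acc with
  | nil =>
    simp only [PySem.Chars.split₀.go, pvAux, List.isEmpty_reverse]
    by_cases h : cur.isEmpty <;> simp [h]
  | cons c rest ih =>
    simp only [PySem.Chars.split₀.go, pvAux, List.isEmpty_reverse]
    by_cases hs : PySem.Chars.isspace c <;> by_cases hc : cur.isEmpty <;>
      simp [hs, hc, ih, List.reverse_cons]
  
lemma pv_split₀_eq (cs : List Char) : PySem.Chars.split₀ cs = pvAux [] cs := by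
  simpa using pv_go_eq cs [] []

lemma pv_join_nil_flatten (l : List (List Char)) :
    PySem.Chars.join [] l = l.flatten := by
  induction l with
  | nil => simp [PySem.Chars.join_nil]
  | cons a t ih =>
    cases t with
    | nil => simp [PySem.Chars.join_singleton]
    | cons b t' => simp [PySem.Chars.join_cons_cons, ih]

lemma pv_foldl_I (l : List Int) (b : List String) :
    l.foldl (fun bies _ => bies ++ ["I"]) b = b ++ List.replicate l.length "I" := by
  induction l generalizing b with
  | nil => simp
  | cons x t ih => rw [List.foldl_cons, ih]; simp [List.replicate_succ]

lemma pv_aux_word (w rest cur : List Char) (hw : ∀ c ∈ w, PySem.Chars.isspace c = false) :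
    pvAux cur (w ++ rest) = pvAux (cur ++ w) rest := by
  induction w generalizing cur with
  | nil => simp
  | cons c t ih =>
    have hc := hw c (by simp)
    simp only [List.cons_append, pvAux, hc, Bool.false_eq_true, if_false]
    rw [ih _ (fun x hx => hw x (by simp [hx]))]
    simp

lemma pv_scan_mid (w rest : List Char) (prev : Char) (hw : w ≠ [])
    (hns : ∀ c ∈ w, PySem.Chars.isspace c = false)
    (hp : PySem.Chars.isspace prev = false)
    (hr : PySem.Chars.isspace (rest.headD ' ') = true) :
    pvScan prev (w ++ rest) = List.replicate (w.length - 1) 'I' ++ ['E'] ++ pvScan (w.getLast hw) rest := by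
  induction w generalizing prev with
  | nil => exact absurd rfl hw
  | cons c t ih =>
    have hc := hns c (by simp)
    cases t with
    | nil =>
      simp only [List.headD_eq_head?_getD] at hr
      simp [pvScan, hc, hp, hr, List.getLast]
    | cons d t' =>
      have hd := hns d (by simp)
      have hmid := ih c (by simp) (fun x hx => hns x (List.mem_cons_of_mem c hx)) hc
      simp only [List.cons_append] at hmid ⊢
      rw [pvScan, hmid]
      simp [hd, hp, hc, List.getLast_cons, List.replicate_succ]

lemma pv_scan_word (w rest : List Char) (prev : Char) (hw : w ≠ [])
    (hns : ∀ c ∈ w, PySem.Chars.isspace c = false)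
    (hp : PySem.Chars.isspace prev = true)
    (hr : PySem.Chars.isspace (rest.headD ' ') = true) :
    pvScan prev (w ++ rest) = pvTagW w ++ pvScan (w.getLast hw) rest := by
  cases w with
  | nil => exact absurd rfl hw
  | cons c t =>
    have hc := hns c (by simp)
    cases t with
    | nil =>
      simp only [List.headD_eq_head?_getD] at hr
      simp [pvScan, pvTagW, hc, hp, hr, List.getLast]
    | cons d t' =>
      have hd := hns d (by simp)
      have hmid := pv_scan_mid (d :: t') rest c (by simp)
        (fun x hx => hns x (List.mem_cons_of_mem c hx)) hc hr
      simp only [List.cons_append] at hmid ⊢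
      rw [pvScan, hmid]
      have hlen : (c :: d :: t').length = t'.length + 2 := by simp
      simp only [pvTagW, hlen]
      rcases t' with _ | ⟨x, xs⟩ <;> simp [hc, hp, hd, List.getLast_cons, List.replicate_succ]

lemma pv_main : ∀ (n : Nat) (cs : List Char) (prev : Char), cs.length ≤ n →
    PySem.Chars.isspace prev = true →
    pvScan prev cs = ((pvAux [] cs).map pvTagW).flatten := by
  intro n
  induction n with
  | zero =>
    intro cs prev h _
    have : cs = [] := List.eq_nil_of_length_eq_zero (Nat.le_zero.mp h)
    subst this; simp [pvScan, pvAux]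
  | succ n ih =>
    intro cs prev hlen hp
    cases cs with
    | nil => simp [pvScan, pvAux]
    | cons c rest =>
      by_cases hc : PySem.Chars.isspace c = true
      · have : pvScan prev (c :: rest) = pvScan c rest := by simp [pvScan, hc]
        rw [this, ih rest c (by simpa using Nat.le_of_succ_le_succ hlen) hc]
        simp [pvAux, hc]
      · -- a word starts at c
        have hc' : PySem.Chars.isspace c = false := by simpa using hc
        obtain ⟨w, r2, hsplit, hnsw, hwne, hrhead, hr2len⟩ :
            ∃ w r2, c :: rest = w ++ r2 ∧ (∀ x ∈ w, PySem.Chars.isspace x = false) ∧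
              w ≠ [] ∧ PySem.Chars.isspace (r2.headD ' ') = true ∧ r2.length ≤ rest.length := by
          refine ⟨c :: rest.takeWhile (fun x => !PySem.Chars.isspace x),
            rest.dropWhile (fun x => !PySem.Chars.isspace x), ?_, ?_, by simp, ?_,
            List.length_dropWhile_le _ _⟩
          · simp [List.takeWhile_append_dropWhile]
          · intro x hx
            rw [List.mem_cons] at hx
            rcases hx with rfl | hx
            · exact hc'
            · have := List.mem_takeWhile_imp hx
              simpa using this
          · cases hh : rest.dropWhile (fun x => !PySem.Chars.isspace x) with
            | nil => decide
            | cons d t =>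
              have := List.head_dropWhile_not (fun x => !PySem.Chars.isspace x) (l := rest)
              rw [hh] at this
              simpa using this (by simp)
        rw [hsplit, pv_scan_word w r2 prev hwne hnsw hp hrhead,
          pv_aux_word w r2 [] hnsw]
        simp only [List.nil_append]
        have hwe : w.isEmpty = false := by
          cases w with
          | nil => exact absurd rfl hwne
          | cons a b => rfl
        cases hh : r2 with
        | nil =>
          subst hh
          have : pvScan (w.getLast hwne) [] = [] := by simp [pvScan]
          rw [this]
          simp [pvAux, hwe]
        | cons d t =>
          subst hh
          have hd : PySem.Chars.isspace d = true := by simpa using hrhead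
          have hlt : t.length ≤ n := by
            simp only [List.length_cons] at hr2len hlen
            omega
          have hscan : pvScan (w.getLast hwne) (d :: t) = pvScan d t := by
            simp [pvScan, hd]
          rw [hscan, ih t d hlt hd]
          have haux : pvAux w (d :: t) = w :: pvAux [] t := by
            simp [pvAux, hd, hwe]
          rw [haux]
          simp

lemma pv_zip_scan (cs : List Char) (prev : Char) :
    ((prev :: cs ++ [' ']).zip (((prev :: cs ++ [' ']).drop 1).zip ((prev :: cs ++ [' ']).drop 2))).filterMap
      (fun t =>
        if PySem.Chars.isspace t.2.1 then none
        else
          let start := PySem.Chars.isspace t.1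
          let stop := PySem.Chars.isspace t.2.2
          some (if start && stop then 'S' else if start then 'B'
                else if stop then 'E' else 'I'))
      = pvScan prev cs := by
  induction cs generalizing prev with
  | nil => simp [pvScan]
  | cons c rest ih =>
    cases rest with
    | nil =>
      have hs : PySem.Chars.isspace ' ' = true := by decide
      by_cases h : PySem.Chars.isspace c <;>
        by_cases hp : PySem.Chars.isspace prev = true <;>
        simp [pvScan, h, hp, hs]
    | cons d t =>
      have hih := ih (prev := c)
      simp only [List.cons_append, List.drop_succ_cons, List.drop_zero,
        List.zip_cons_cons, List.filterMap_cons] at hih ⊢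
      by_cases h : PySem.Chars.isspace c
      all_goals
        simp [h] at hih ⊢
        try rw [hih]
        try simp [pvScan, h]

-- A's per-word value equals pvTagW, on the character level
lemma pv_pyRange_len (m : Int) : (PySem.List.pyRange 1 m 1).length = (m - 1).toNat := by
  simp only [PySem.List.pyRange]
  norm_num
  omega

lemma pv_word_tag (w : String) :
    (if PySem.Str.len w = 1 then ("S" : String)
     else if PySem.Str.len w = 2 then "BE"
     else PySem.Str.join ""
       (((PySem.List.pyRange 1 (PySem.Str.len w - 1) 1).foldl
          (fun bies _ => bies ++ ["I"]) ["B"]) ++ ["E"])).toList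
      = pvTagW w.toList := by
  have hlen : PySem.Str.len w = (w.toList.length : Int) := rfl
  by_cases h1 : w.toList.length = 1
  · simp [pvTagW, h1]
  · by_cases h2 : w.toList.length = 2
    · simp [pvTagW, h2]
    · have hn1 : (w.toList.length : Int) ≠ 1 := by exact_mod_cast h1
      have hn2 : (w.toList.length : Int) ≠ 2 := by exact_mod_cast h2
      rw [hlen]
      simp only [hn1, hn2, if_false]
      rw [pv_foldl_I, PySem.Str.toList_join,
        show ("" : String).toList = [] from rfl, pv_join_nil_flatten]
      have hplen : (PySem.List.pyRange 1 ((w.toList.length : Int) - 1) 1).length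
          = w.toList.length - 2 := by
        rw [pv_pyRange_len]; omega
      rw [hplen]
      have h1' : w.length ≠ 1 := by rw [← String.length_toList]; exact h1
      have h2' : w.length ≠ 2 := by rw [← String.length_toList]; exact h2
      simp [pvTagW, h1', h2']

-- the per-word function A's fold applies, pulled out of the fold
lemma pv_foldl_branches (l : List String) (acc : List String) :
    l.foldl (fun bies_array word =>
      let word_length := PySem.Str.len word
      if word_length = 1 then bies_array ++ ["S"]
      else if word_length = 2 then bies_array ++ ["BE"]
      else
        let bies : List String := ["B"]
        let bies := (PySem.List.pyRange 1 (PySem.Str.len word - 1) 1).foldl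
          (fun bies _ => bies ++ ["I"]) bies
        let bies := bies ++ ["E"]
        bies_array ++ [PySem.Str.join "" bies]) acc
    = acc ++ l.map (fun word =>
        if PySem.Str.len word = 1 then ("S" : String)
        else if PySem.Str.len word = 2 then "BE"
        else PySem.Str.join "" (((PySem.List.pyRange 1 (PySem.Str.len word - 1) 1).foldl
          (fun bies _ => bies ++ ["I"]) ["B"]) ++ ["E"])) := by
  induction l generalizing acc with
  | nil => simp
  | cons x t ih =>
    simp only [List.foldl_cons, List.map_cons, ih]
    split_ifs <;> simp

theorem pv_equal (s : String) : string_to_BIES s = string_to_BIES_alt s := by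
  apply String.ext
  simp only [string_to_BIES, string_to_BIES_alt]
  rw [String.toList_ofList, pv_zip_scan s.toList ' ']
  rw [pv_foldl_branches, List.nil_append, PySem.Str.toList_join,
    show ("" : String).toList = [] from rfl, pv_join_nil_flatten, List.map_map]
  have hmap : (List.map (String.toList ∘ fun word =>
        if PySem.Str.len word = 1 then ("S" : String)
        else if PySem.Str.len word = 2 then "BE"
        else PySem.Str.join "" (((PySem.List.pyRange 1 (PySem.Str.len word - 1) 1).foldl
          (fun bies _ => bies ++ ["I"]) ["B"]) ++ ["E"])) (PySem.Str.split₀ s))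
      = List.map pvTagW (List.map String.toList (PySem.Str.split₀ s)) := by
    rw [List.map_map]
    exact List.map_congr_left (fun w _ => pv_word_tag w)
  rw [hmap, PySem.Str.split₀_map_toList, pv_split₀_eq,
    ← pv_main s.toList.length s.toList ' ' le_rfl (by decide)]

-- ===== VERDICT (by name: the statement is the Claim_ definition above) =====
theorem string_to_BIES_spec : Claim_equal_string_to_BIES := by
  intro s _
  exact pv_equal s
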